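-- pv_equiv track=rewrite | github.com/tanmayidev/dsa-solutions | freecodecamp/daily-code-challenge/2026-01-29.py | separate_letters_and_numbers
-- ===== SOURCE A (Python) =====
-- def separate_letters_and_numbers(s):
--     if not s:
--         return s
--
--     result = [s[0]]
--
--     for i in range(1, len(s)):
--         prev = s[i - 1]
--         curr = s[i]
--
--         if (prev.isalpha() and curr.isdigit()) or (prev.isdigit() and curr.isalpha()):
--             result.append('-')
--
--         result.append(curr)
--
--     return ''.join(result)
-- ===== SOURCE B (Python) =====
-- def separate_letters_and_numbers(s):
--     def cat(c):
--         if c.isalpha():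
--             return 0
--         if c.isdigit():
--             return 1
--         return 2
--
--     # collapse s into maximal runs of characters of equal category
--     runs = []
--     for c in s:
--         if runs and cat(runs[-1][0]) == cat(c):
--             runs[-1].append(c)
--         else:
--             runs.append([c])
--
--     if not runs:
--         return s
--
--     # join the runs, inserting '-' exactly between an alpha run and a digit run
--     out = list(runs[0])
--     for prev, run in zip(runs, runs[1:]):
--         if cat(prev[0]) + cat(run[0]) == 1:  # one alpha run and one digit run
--             out.append('-')
--         out.extend(run)
--     return ''.join(out)
-- ===== Notes on version B (the rewrite author's own statement) =====
-- stated objective: alternative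
-- what changed: B first collapses the string into maximal runs of equal category (alpha/digit/other) and then joins adjacent runs with a dash exactly when one run is alphabetic and the other numeric, instead of A's single pairwise scan over character indices.
import Mathlib
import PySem

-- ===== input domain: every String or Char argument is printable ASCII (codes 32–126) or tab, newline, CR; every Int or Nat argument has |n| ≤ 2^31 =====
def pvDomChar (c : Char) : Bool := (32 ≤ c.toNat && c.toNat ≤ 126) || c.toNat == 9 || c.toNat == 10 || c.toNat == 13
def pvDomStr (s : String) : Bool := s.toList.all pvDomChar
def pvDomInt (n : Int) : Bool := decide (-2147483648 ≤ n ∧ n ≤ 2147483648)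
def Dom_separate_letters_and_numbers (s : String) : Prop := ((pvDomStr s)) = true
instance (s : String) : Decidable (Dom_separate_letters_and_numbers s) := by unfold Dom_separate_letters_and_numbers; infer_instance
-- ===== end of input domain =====

-- B re-implements A by a run-based decomposition (group into category runs, then join with dashes); same O(n) cost, alternative structure.

-- ===== PORT A =====
-- the letter/digit boundary test of A's loop body
def pvBoundary (p c : Char) : Bool :=
  (PySem.Chars.isalpha p && PySem.Chars.isdigit c) || (PySem.Chars.isdigit p && PySem.Chars.isalpha c)

def separate_letters_and_numbers (s : String) : String :=
  let cs := s.toList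
  if cs.isEmpty then s
  else
    let result := (PySem.List.pyRange 1 (cs.length : Int) 1).foldl
      (fun result i =>
        let prev := PySem.List.pyGetD cs (i - 1) ' '
        let curr := PySem.List.pyGetD cs i ' '
        let result := if pvBoundary prev curr then result ++ ['-'] else result
        result ++ [curr])
      [cs.headD ' ']
    String.ofList result

-- ===== PORT B =====
-- B's category function: 0 = alpha, 1 = digit, 2 = other
def pvCat (c : Char) : Int :=
  if PySem.Chars.isalpha c then 0 else if PySem.Chars.isdigit c then 1 else 2

-- one step of B's grouping loop (append c to the last run, or start a new run)
def pvAddRun (runs : List (List Char)) (c : Char) : List (List Char) :=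
  match runs.getLast? with
  | some last =>
      if pvCat (last.headD ' ') == pvCat c then runs.dropLast ++ [last ++ [c]]
      else runs ++ [[c]]
  | none => runs ++ [[c]]

def separate_letters_and_numbers_alt (s : String) : String :=
  let runs := s.toList.foldl pvAddRun []
  match runs with
  | [] => s
  | r0 :: rest =>
    let out := ((r0 :: rest).zip rest).foldl
      (fun out pr =>
        (if pvCat (pr.1.headD ' ') + pvCat (pr.2.headD ' ') == 1 then out ++ ['-'] else out)
          ++ pr.2)
      r0
    String.ofList out

-- ===== PRECONDITION & SPEC =====
def Spec_separate_letters_and_numbers (s : String) (out : String) : Prop := out = separate_letters_and_numbers_alt s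
instance (s : String) (out : String) : Decidable (Spec_separate_letters_and_numbers s out) := by unfold Spec_separate_letters_and_numbers; infer_instance

-- ===== CLAIM (what is proved, stated in full; the proofs are below) =====
def Claim_equal_separate_letters_and_numbers : Prop := ∀ (s : String), Dom_separate_letters_and_numbers s → Spec_separate_letters_and_numbers s (separate_letters_and_numbers s)

-- ===== LEMMAS AND PROOFS =====

-- canonical form: the characters after the first, with dashes inserted at boundaries
def pvGo (p : Char) : List Char → List Char
  | [] => []
  | c :: rest => (if pvBoundary p c then '-' :: c :: pvGo c rest else c :: pvGo c rest)

-- canonical grouping: current run `cur`, remaining characters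
def pvGrpAux (cur : List Char) : List Char → List (List Char)
  | [] => [cur]
  | c :: rest =>
      if pvCat (cur.headD ' ') == pvCat c then pvGrpAux (cur ++ [c]) rest
      else cur :: pvGrpAux [c] rest

-- canonical joining of runs with dashes
def pvJoinD (prev : List Char) : List (List Char) → List Char
  | [] => []
  | r :: rs =>
      (if pvCat (prev.headD ' ') + pvCat (r.headD ' ') == 1 then '-' :: r else r) ++ pvJoinD r rs

def pvJoinAll : List (List Char) → List Char
  | [] => []
  | r :: rs => r ++ pvJoinD r rs

theorem pvAlpha_digit_disjoint (c : Char) : (PySem.Chars.isalpha c && PySem.Chars.isdigit c) = false := by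
  simp [PySem.Chars.isalpha, PySem.Chars.isupper, PySem.Chars.islower, PySem.Chars.isdigit,
    Char.le_def, UInt32.le_iff_toNat_le]
  intro h1 h2
  omega

theorem pvBoundary_eq_cat (a b : Char) : pvBoundary a b = (pvCat a + pvCat b == 1) := by
  have ha := pvAlpha_digit_disjoint a
  have hb := pvAlpha_digit_disjoint b
  unfold pvBoundary pvCat
  cases h1 : PySem.Chars.isalpha a <;> cases h2 : PySem.Chars.isdigit a <;>
    cases h3 : PySem.Chars.isalpha b <;> cases h4 : PySem.Chars.isdigit b <;>
    simp_all

theorem pvBoundary_of_same_cat (a b : Char) (h : pvCat a = pvCat b) : pvBoundary a b = false := by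
  rw [pvBoundary_eq_cat, h]
  unfold pvCat
  split_ifs <;> simp

-- A's loop from position k+1 equals the canonical form
theorem pvA_loop (cs : List Char) (k : Nat) (acc : List Char) (hk : k < cs.length) :
    (PySem.List.pyRange ((k : Int) + 1) (cs.length : Int) 1).foldl
      (fun result i =>
        let prev := PySem.List.pyGetD cs (i - 1) ' '
        let curr := PySem.List.pyGetD cs i ' '
        let result := if pvBoundary prev curr then result ++ ['-'] else result
        result ++ [curr])
      acc
    = acc ++ pvGo cs[k] (cs.drop (k + 1)) := by
  by_cases h : k + 1 < cs.length
  · have hrec := pvA_loop cs (k + 1) ((if pvBoundary cs[k] cs[k+1] then acc ++ ['-'] else acc) ++ [cs[k+1]]) h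
    rw [PySem.List.pyRange_one_cons (by omega : (k : Int) + 1 < (cs.length : Int))]
    rw [List.foldl_cons]
    have e1 : PySem.List.pyGetD cs ((k : Int) + 1 - 1) ' ' = cs[k] := by
      simp only [add_sub_cancel_right, PySem.List.pyGetD_natCast]
      exact List.getD_eq_getElem cs ' ' hk
    have e2 : PySem.List.pyGetD cs ((k : Int) + 1) ' ' = cs[k+1] := by
      have : ((k : Int) + 1) = ((k + 1 : Nat) : Int) := by push_cast; ring
      rw [this, PySem.List.pyGetD_natCast]
      exact List.getD_eq_getElem cs ' ' h
    have e3 : ((k : Int) + 1 + 1) = (((k + 1 : Nat) : Int) + 1) := by push_cast; ring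
    simp only [e1, e2]
    rw [e3, hrec]
    rw [show List.drop (k+1) cs = cs[k+1] :: List.drop (k+1+1) cs from List.drop_eq_getElem_cons h]
    simp only [pvGo]
    split_ifs <;> simp
  · have hlen : cs.length = k + 1 := by omega
    rw [PySem.List.pyRange_one_eq_nil (by omega : (cs.length : Int) ≤ (k : Int) + 1)]
    have hdrop : List.drop (k + 1) cs = [] := by
      apply List.drop_eq_nil_of_le; omega
    simp [hdrop, pvGo]
termination_by cs.length - k

theorem pvGrpAux_ne_nil : ∀ (xs cur : List Char), pvGrpAux cur xs ≠ []
  | [], cur => by simp [pvGrpAux]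
  | c :: rest, cur => by
    unfold pvGrpAux
    split_ifs with hc
    · exact pvGrpAux_ne_nil rest (cur ++ [c])
    · simp

theorem pvGrpAux_head : ∀ (xs cur : List Char), cur ≠ [] →
    ((pvGrpAux cur xs).headD []).headD ' ' = cur.headD ' '
  | [], cur, h => by simp [pvGrpAux]
  | c :: rest, cur, h => by
    unfold pvGrpAux
    split_ifs with hc
    · have := pvGrpAux_head rest (cur ++ [c]) (by simp)
      rw [this]
      cases cur with
      | nil => exact absurd rfl h
      | cons a t => simp
    · simp

-- B's grouping loop equals the canonical grouping
theorem pvB1 : ∀ (xs : List Char) (closed : List (List Char)) (cur : List Char),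
    List.foldl pvAddRun (closed ++ [cur]) xs = closed ++ pvGrpAux cur xs
  | [], closed, cur => by simp [pvGrpAux]
  | c :: rest, closed, cur => by
    simp only [List.foldl_cons, pvAddRun, pvGrpAux, List.getLast?_concat]
    by_cases hc : pvCat (cur.headD ' ') == pvCat c
    · simp only [hc, if_pos, List.dropLast_concat]
      exact pvB1 rest closed (cur ++ [c])
    · simp only [hc, Bool.false_eq_true, ite_false]
      have : (closed ++ [cur]) ++ [[c]] = (closed ++ [cur]) ++ [[c]] := rfl
      rw [show closed ++ [cur] ++ [[c]] = (closed ++ [cur]) ++ [[c]] from by simp]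
      rw [pvB1 rest (closed ++ [cur]) [c]]
      simp

-- B's joining loop equals the canonical join
theorem pvB2 : ∀ (rs : List (List Char)) (r out : List Char),
    List.foldl
      (fun out pr =>
        (if pvCat (pr.1.headD ' ') + pvCat (pr.2.headD ' ') == 1 then out ++ ['-'] else out)
          ++ pr.2)
      out ((r :: rs).zip rs)
    = out ++ pvJoinD r rs
  | [], r, out => by simp [pvJoinD]
  | r' :: rs', r, out => by
    simp only [List.zip_cons_cons, List.foldl_cons]
    rw [pvB2 rs' r' _]
    simp only [pvJoinD]
    split_ifs <;> simp

-- canonical grouping then joining equals the canonical pairwise form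
theorem pvB3 : ∀ (xs cur : List Char) (h : cur ≠ [])
    (_ : ∀ c ∈ cur, pvCat c = pvCat (cur.headD ' ')),
    pvJoinAll (pvGrpAux cur xs) = cur ++ pvGo (cur.getLast h) xs
  | [], cur, h, hsame => by simp [pvGrpAux, pvJoinAll, pvJoinD, pvGo]
  | c :: rest, cur, h, hsame => by
    have hlastcat : pvCat (cur.getLast h) = pvCat (cur.headD ' ') :=
      hsame _ (List.getLast_mem h)
    by_cases hc : pvCat (cur.headD ' ') = pvCat c
    · -- same category: c joins the current run
      have hne : cur ++ [c] ≠ [] := by simp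
      have hsame' : ∀ d ∈ cur ++ [c], pvCat d = pvCat ((cur ++ [c]).headD ' ') := by
        intro d hd
        have hh : (cur ++ [c]).headD ' ' = cur.headD ' ' := by
          cases cur with
          | nil => exact absurd rfl h
          | cons a t => simp
        rw [hh]
        rcases List.mem_append.1 hd with h1 | h1
        · exact hsame d h1
        · simp at h1; subst h1; exact hc.symm
      have ih := pvB3 rest (cur ++ [c]) hne hsame'
      simp only [pvGrpAux, if_pos (beq_iff_eq.2 hc)]
      rw [ih]
      have hlast' : (cur ++ [c]).getLast hne = c := by simp
      rw [hlast']
      have hnb : pvBoundary (cur.getLast h) c = false := by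
        apply pvBoundary_of_same_cat; rw [hlastcat, hc]
      simp [pvGo, hnb]
    · -- new run starts at c
      have ih := pvB3 rest [c] (by simp) (by intro d hd; simp at hd; subst hd; rfl)
      have hcb : (pvCat (cur.headD ' ') == pvCat c) = false := by simpa using hc
      obtain ⟨r0, rs, hr⟩ : ∃ r0 rs, pvGrpAux [c] rest = r0 :: rs := by
        cases hgrp : pvGrpAux [c] rest with
        | nil => exact absurd hgrp (pvGrpAux_ne_nil _ _)
        | cons a b => exact ⟨a, b, rfl⟩
      have hhead : r0.headD ' ' = c := by
        have := pvGrpAux_head rest [c] (by simp)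
        rw [hr] at this; simpa using this
      rw [hr] at ih
      simp only [pvJoinAll, List.getLast_singleton] at ih
      simp only [pvGrpAux, hcb, Bool.false_eq_true, ite_false, hr]
      simp only [pvJoinAll, pvJoinD]
      rw [hhead]
      simp only [pvGo]
      rw [pvBoundary_eq_cat, hlastcat]
      by_cases hb : pvCat (cur.headD ' ') + pvCat c = 1
      · simp only [beq_iff_eq, hb, ite_true]
        rw [← List.append_assoc]
        simp [ih]
      · simp only [beq_iff_eq, hb, ite_false]
        simp [ih]

theorem pv_main (s : String) :
    separate_letters_and_numbers s = separate_letters_and_numbers_alt s := by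
  cases h : s.toList with
  | nil =>
    simp [separate_letters_and_numbers, separate_letters_and_numbers_alt, h]
  | cons x xs =>
    -- A's value
    have hA : separate_letters_and_numbers s = String.ofList (x :: pvGo x xs) := by
      have hl := pvA_loop (x :: xs) 0 [x] (by simp)
      simp only [separate_letters_and_numbers, h]
      norm_num at hl ⊢
      rw [hl]
    -- B's value
    have hruns : List.foldl pvAddRun [] (x :: xs) = pvGrpAux [x] xs := by
      rw [List.foldl_cons]
      have h0 : pvAddRun [] x = [] ++ [[x]] := rfl
      rw [h0, pvB1]
      simp
    have hB : separate_letters_and_numbers_alt s = String.ofList (x :: pvGo x xs) := by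
      have h3 := pvB3 xs [x] (by simp) (by intro d hd; simp at hd; subst hd; rfl)
      simp only [List.getLast_singleton] at h3
      obtain ⟨r0, rs, hr⟩ : ∃ r0 rs, pvGrpAux [x] xs = r0 :: rs := by
        cases hgrp : pvGrpAux [x] xs with
        | nil => exact absurd hgrp (pvGrpAux_ne_nil _ _)
        | cons a b => exact ⟨a, b, rfl⟩
      rw [hr] at h3
      simp only [pvJoinAll] at h3
      simp only [separate_letters_and_numbers_alt, h, hruns, hr]
      rw [pvB2]
      rw [h3]
      simp
    rw [hA, hB]

-- ===== VERDICT (by name: the statement is the Claim_ definition above) =====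
theorem separate_letters_and_numbers_spec : Claim_equal_separate_letters_and_numbers := by
  intro s _
  unfold Spec_separate_letters_and_numbers
  exact pv_main s
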